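-- pv_equiv track=rewrite | github.com/traktorspace/ml_ops | data_pipeline/utils/encord_utils.py | fetch_annotations_duplicates
-- ===== SOURCE A (Python) =====
-- from collections import Counter
--
-- def fetch_annotations_duplicates(
--     annotations: dict[str, list[str]],
-- ) -> list[str]:
--     """
--     Identify duplicate annotation IDs inside the same stage.
--
--     Parameters
--     ----------
--     annotations:
--         Mapping ``{stage_name: [annotation_id, ...]}``.
--
--     Returns
--     -------
--     list[str]
--         Sorted list of annotation IDs that occur more than once
--         in at least one stage.  Each ID appears only once in the output.
--
--     Examples
--     --------
--     >>> anns = {"Annotate 1": ["a1", "a2", "a1"], "Complete": ["b1"]}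
--     >>> fetch_annotations_duplicates(anns)
--     ['a1']
--     """
--     return sorted(
--         {
--             ann_id
--             for ids in annotations.values()
--             for ann_id, cnt in Counter(ids).items()
--             if cnt > 1
--         }
--     )
-- ===== SOURCE B (Python) =====
-- def fetch_annotations_duplicates(annotations):
--     # Sort-based: an id is duplicated in a stage iff, after sorting the
--     # stage's ids, it appears next to an equal neighbour.  Collect those
--     # neighbours, sort the candidates, and compress equal runs to one
--     # representative -- no Counter and no sets anywhere.
--     cand = []
--     for ids in annotations.values():
--         s = sorted(ids)
--         for a, b in zip(s, s[1:]):
--             if a == b: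
--                 cand.append(b)
--     cand.sort()
--     out = []
--     prev = None
--     for x in cand:
--         if x != prev:
--             out.append(x)
--             prev = x
--     return out
-- ===== Notes on version B (the rewrite author's own statement) =====
-- stated objective: alternative
-- what changed: Replaces Counter-multiplicities-filtered-by-count>1 and set union with a purely sort-based algorithm: sort each stage, detect duplicates as adjacent equal neighbours via zip(s, s[1:]), sort the collected candidates and compress equal runs with a prev pointer; no hash container is used at all.
import Mathlib
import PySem

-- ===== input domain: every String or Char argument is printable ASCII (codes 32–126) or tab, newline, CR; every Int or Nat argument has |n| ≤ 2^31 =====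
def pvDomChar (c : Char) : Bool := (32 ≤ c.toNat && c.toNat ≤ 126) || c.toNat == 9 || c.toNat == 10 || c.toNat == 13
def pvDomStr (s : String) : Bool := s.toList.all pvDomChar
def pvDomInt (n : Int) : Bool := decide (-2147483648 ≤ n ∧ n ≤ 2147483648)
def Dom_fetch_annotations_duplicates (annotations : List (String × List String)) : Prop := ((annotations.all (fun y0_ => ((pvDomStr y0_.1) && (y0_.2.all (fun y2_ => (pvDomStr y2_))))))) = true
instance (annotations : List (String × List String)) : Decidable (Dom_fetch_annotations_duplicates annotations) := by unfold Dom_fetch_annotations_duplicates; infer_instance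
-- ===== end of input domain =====

-- B is sort-based instead of Counter-based: sort each stage, detect duplicates as adjacent
-- equal neighbours, sort the candidates and compress equal runs; alternative structure, no hash container.

-- ===== PORT A =====
-- set comprehension: for ids in annotations.values(), for (ann_id, cnt) in Counter(ids).items(), keep ann_id if cnt > 1
def fetch_annotations_duplicates (annotations : List (String × List String)) : List String :=
  let s : PySem.Set String :=
    annotations.foldl
      (fun acc p =>
        ((PySem.Dict.counter p.2).items).foldl
          (fun acc2 kv => if kv.2 > 1 then PySem.Set.add acc2 kv.1 else acc2) acc)
      PySem.Set.empty
  PySem.List.sorted s (fun x => x) false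

-- ===== PORT B =====
-- cand: per stage, sorted ids zipped with their shift; append b whenever a == b;
-- then cand.sort() and a prev-pointer run-compression loop
def fetch_annotations_duplicates_alt (annotations : List (String × List String)) : List String :=
  let cand : List String :=
    annotations.foldl
      (fun acc p =>
        let s := PySem.List.sorted p.2 (fun x => x) false
        (s.zip (PySem.List.slice s (some 1) none)).foldl
          (fun acc2 ab => if ab.1 = ab.2 then acc2 ++ [ab.2] else acc2) acc)
      []
  let cand2 := PySem.List.sorted cand (fun x => x) false
  (cand2.foldl
    (fun (op : List String × Option String) x =>
      if op.2 = some x then op else (op.1 ++ [x], some x))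
    ([], (none : Option String))).1

-- ===== PRECONDITION & SPEC =====
def Spec_fetch_annotations_duplicates (annotations : List (String × List String)) (out : List String) : Prop := out = fetch_annotations_duplicates_alt annotations
instance (annotations : List (String × List String)) (out : List String) : Decidable (Spec_fetch_annotations_duplicates annotations out) := by unfold Spec_fetch_annotations_duplicates; infer_instance

-- ===== CLAIM (what is proved, stated in full; the proofs are below) =====
def Claim_equal_fetch_annotations_duplicates : Prop := ∀ (annotations : List (String × List String)), Dom_fetch_annotations_duplicates annotations → Spec_fetch_annotations_duplicates annotations (fetch_annotations_duplicates annotations)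

-- ===== LEMMAS AND PROOFS =====

-- ---- A side: the collected set has membership "some stage has count ≥ 2", and is Nodup ----

theorem memA_inner (l : List (String × Int)) (acc : PySem.Set String) (x : String) :
    x ∈ l.foldl (fun acc2 kv => if kv.2 > 1 then PySem.Set.add acc2 kv.1 else acc2) acc ↔
      x ∈ acc ∨ ∃ kv ∈ l, kv.2 > 1 ∧ x = kv.1 := by
  induction l generalizing acc with
  | nil => simp
  | cons kv l ih =>
    simp only [List.foldl_cons, ih]
    split_ifs with h
    · simp only [PySem.Set.mem_add, List.mem_cons]
      constructor
      · rintro (⟨h1 | h1⟩ | ⟨p, hp, hgt, hx⟩)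
        · exact Or.inl h1
        · exact Or.inr ⟨kv, Or.inl rfl, h, h1⟩
        · exact Or.inr ⟨p, Or.inr hp, hgt, hx⟩
      · rintro (h1 | ⟨p, (rfl | hp), hgt, hx⟩)
        · exact Or.inl (Or.inl h1)
        · exact Or.inl (Or.inr hx)
        · exact Or.inr ⟨p, hp, hgt, hx⟩
    · constructor
      · rintro (h1 | ⟨p, hp, hgt, hx⟩)
        · exact Or.inl h1
        · exact Or.inr ⟨p, List.mem_cons_of_mem _ hp, hgt, hx⟩
      · rintro (h1 | ⟨p, hp, hgt, hx⟩)
        · exact Or.inl h1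
        · rcases List.mem_cons.mp hp with rfl | hp
          · exact absurd hgt h
          · exact Or.inr ⟨p, hp, hgt, hx⟩

theorem nodupA_inner (l : List (String × Int)) (acc : PySem.Set String) (h : acc.Nodup) :
    (l.foldl (fun acc2 kv => if kv.2 > 1 then PySem.Set.add acc2 kv.1 else acc2) acc).Nodup := by
  induction l generalizing acc with
  | nil => exact h
  | cons kv l ih =>
    simp only [List.foldl_cons]
    split_ifs
    · exact ih _ (PySem.Set.nodup_add _ _ h)
    · exact ih _ h

theorem memA_stage (ids : List String) (acc : PySem.Set String) (x : String) :
    x ∈ ((PySem.Dict.counter ids).items).foldl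
        (fun acc2 kv => if kv.2 > 1 then PySem.Set.add acc2 kv.1 else acc2) acc ↔
      x ∈ acc ∨ 2 ≤ ids.count x := by
  rw [memA_inner, PySem.Dict.items_counter]
  constructor
  · rintro (h | ⟨kv, hkv, hgt, rfl⟩)
    · exact Or.inl h
    · rcases List.mem_map.mp hkv with ⟨k, _, rfl⟩
      refine Or.inr ?_
      show 2 ≤ ids.count k
      have : (1 : Int) < (ids.count k : Int) := hgt
      omega
  · rintro (h | h)
    · exact Or.inl h
    · refine Or.inr ⟨(x, (ids.count x : Int)), List.mem_map.mpr ⟨x, ?_, rfl⟩, by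
        show (1 : Int) < (ids.count x : Int); omega, rfl⟩
      exact (PySem.Set.mem_ofList ids x).mpr (List.count_pos_iff.mp (by omega))

theorem memA_outer (annotations : List (String × List String)) (acc : PySem.Set String) (x : String) :
    x ∈ annotations.foldl
        (fun acc p =>
          ((PySem.Dict.counter p.2).items).foldl
            (fun acc2 kv => if kv.2 > 1 then PySem.Set.add acc2 kv.1 else acc2) acc) acc ↔
      x ∈ acc ∨ ∃ p ∈ annotations, 2 ≤ p.2.count x := by
  induction annotations generalizing acc with
  | nil => simp
  | cons p l ih =>
    simp only [List.foldl_cons, ih, memA_stage, List.mem_cons]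
    constructor
    · rintro (⟨h | h⟩ | ⟨q, hq, hc⟩)
      · exact Or.inl h
      · exact Or.inr ⟨p, Or.inl rfl, h⟩
      · exact Or.inr ⟨q, Or.inr hq, hc⟩
    · rintro (h | ⟨q, (rfl | hq), hc⟩)
      · exact Or.inl (Or.inl h)
      · exact Or.inl (Or.inr hc)
      · exact Or.inr ⟨q, hq, hc⟩

theorem nodupA_outer (annotations : List (String × List String)) (acc : PySem.Set String) (h : acc.Nodup) :
    (annotations.foldl
        (fun acc p =>
          ((PySem.Dict.counter p.2).items).foldl
            (fun acc2 kv => if kv.2 > 1 then PySem.Set.add acc2 kv.1 else acc2) acc) acc).Nodup := by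
  induction annotations generalizing acc with
  | nil => exact h
  | cons p l ih => exact ih _ (nodupA_inner _ _ h)

-- ---- B side ----

-- adjacent duplicates of a list, as B's zip-filter produces them
def pvZipDups (l : List String) : List String :=
  ((l.zip (l.drop 1)).filter (fun ab => decide (ab.1 = ab.2))).map Prod.snd

-- in a (≤)-sorted list, an adjacent equal neighbour exists exactly for elements of count ≥ 2
theorem mem_pvZipDups (l : List String) (hl : l.Pairwise (· ≤ ·)) (x : String) :
    x ∈ pvZipDups l ↔ 2 ≤ l.count x := by
  induction l with
  | nil => simp [pvZipDups]
  | cons a t ih =>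
    cases t with
    | nil =>
      constructor
      · intro h; simp [pvZipDups] at h
      · intro h
        exfalso
        have hle : [a].count x ≤ [a].length := List.count_le_length
        simp at hle
        omega
    | cons b t' =>
      have hst : (b :: t').Pairwise (· ≤ ·) := hl.of_cons
      have hab : a ≤ b := List.rel_of_pairwise_cons hl (List.mem_cons_self)
      have hstep : pvZipDups (a :: b :: t') =
          (if a = b then [b] else []) ++ pvZipDups (b :: t') := by
        simp only [pvZipDups, List.drop_succ_cons, List.drop_zero, List.zip_cons_cons,
          List.filter_cons]
        by_cases h : a = b <;> simp [h]
      have hif : x ∈ (if a = b then [b] else []) ↔ a = b ∧ x = b := by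
        split_ifs with h <;> simp [h]
      rw [hstep, List.mem_append, hif, ih hst]
      have hcnt : (a :: b :: t').count x = (b :: t').count x + (if a = x then 1 else 0) := by
        simp [List.count_cons]
      rw [hcnt]
      by_cases hxa : x = a
      · rw [if_pos hxa.symm]
        by_cases hxb : x = b
        · have hmemb : x ∈ b :: t' := hxb ▸ List.mem_cons_self
          have hpos : 0 < (b :: t').count x := List.count_pos_iff.mpr hmemb
          constructor
          · intro _; omega
          · intro _; exact Or.inl ⟨hxa.symm.trans hxb, hxb⟩
        · have hnot : x ∉ b :: t' := by
            intro hmem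
            rcases List.mem_cons.mp hmem with h | hmem'
            · exact hxb h
            · have hby : b ≤ x := List.rel_of_pairwise_cons hst hmem'
              have hxle : x ≤ b := by rw [hxa]; exact hab
              exact hxb (le_antisymm hxle hby)
          have hc0 : (b :: t').count x = 0 := List.count_eq_zero.mpr hnot
          rw [hc0]
          constructor
          · rintro (⟨h3, h4⟩ | h1)
            · exact absurd h4 hxb
            · omega
          · intro h1; omega
      · have hax : ¬ a = x := fun h => hxa h.symm
        rw [if_neg hax]
        constructor
        · rintro (⟨h3, h4⟩ | h1)
          · exact absurd (h3.trans h4.symm) hax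
          · omega
        · intro h1; exact Or.inr (by omega)

-- B's candidate accumulator equals a flatMap of per-stage adjacent duplicates
theorem candB_eq (annotations : List (String × List String)) (acc : List String) :
    annotations.foldl
      (fun acc p =>
        let s := PySem.List.sorted p.2 (fun x => x) false
        (s.zip (PySem.List.slice s (some 1) none)).foldl
          (fun acc2 ab => if ab.1 = ab.2 then acc2 ++ [ab.2] else acc2) acc)
      acc
    = acc ++ annotations.flatMap (fun p => pvZipDups (PySem.List.sorted p.2 (fun x => x) false)) := by
  induction annotations generalizing acc with
  | nil => simp
  | cons p l ih =>
    simp only [List.foldl_cons, List.flatMap_cons, ih]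
    have hslice : ∀ (s : List String), PySem.List.slice s (some 1) none = s.drop 1 := by
      intro s
      have := PySem.List.slice_from_natCast (xs := s) (a := 1)
      simpa using this
    rw [hslice]
    rw [PySem.List.foldl_append_ite (p := fun ab => ab.1 = ab.2) (f := Prod.snd)]
    simp [pvZipDups, List.append_assoc]

theorem mem_candB (annotations : List (String × List String)) (x : String) :
    x ∈ annotations.flatMap (fun p => pvZipDups (PySem.List.sorted p.2 (fun x => x) false)) ↔
      ∃ p ∈ annotations, 2 ≤ p.2.count x := by
  simp only [List.mem_flatMap]
  constructor
  · rintro ⟨p, hp, hx⟩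
    refine ⟨p, hp, ?_⟩
    have hs := mem_pvZipDups _ (PySem.List.sorted_pairwise p.2 (fun x => x)) x
    have := hs.mp hx
    rwa [(PySem.List.sorted_perm p.2 (fun x => x) false).count_eq] at this
  · rintro ⟨p, hp, hc⟩
    refine ⟨p, hp, ?_⟩
    rw [mem_pvZipDups _ (PySem.List.sorted_pairwise p.2 (fun x => x)),
      (PySem.List.sorted_perm p.2 (fun x => x) false).count_eq]
    exact hc

-- the prev-pointer run-compression fold: membership and strict sortedness, by one induction
theorem dedupFold_char (l : List String) (acc : List String) (prev : Option String)
    (hl : l.Pairwise (· ≤ ·))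
    (hprev : ∀ p, prev = some p → ∀ y ∈ l, p ≤ y)
    (hacc : acc.Pairwise (· < ·))
    (hlt : ∀ y ∈ acc, ∀ z ∈ l, prev = some z ∨ y < z) :
    (∀ x, x ∈ (l.foldl
        (fun (op : List String × Option String) x =>
          if op.2 = some x then op else (op.1 ++ [x], some x)) (acc, prev)).1 ↔
        x ∈ acc ∨ (x ∈ l ∧ prev ≠ some x))
    ∧ (l.foldl
        (fun (op : List String × Option String) x =>
          if op.2 = some x then op else (op.1 ++ [x], some x)) (acc, prev)).1.Pairwise (· < ·) := by
  induction l generalizing acc prev with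
  | nil => exact ⟨by simp, hacc⟩
  | cons a t ih =>
    have hta : ∀ y ∈ t, a ≤ y := fun y hy => List.rel_of_pairwise_cons hl hy
    by_cases hpa : prev = some a
    · -- skip a
      simp only [List.foldl_cons, if_pos hpa]
      obtain ⟨hmem, hsorted⟩ := ih acc prev hl.of_cons
        (fun p hp y hy => hprev p hp y (List.mem_cons_of_mem _ hy)) hacc
        (fun y hy z hz => hlt y hy z (List.mem_cons_of_mem _ hz))
      refine ⟨fun x => ?_, hsorted⟩
      rw [hmem x]
      constructor
      · rintro (h | ⟨h1, h2⟩)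
        · exact Or.inl h
        · exact Or.inr ⟨List.mem_cons_of_mem _ h1, h2⟩
      · rintro (h | ⟨h1, h2⟩)
        · exact Or.inl h
        · rcases List.mem_cons.mp h1 with rfl | h1
          · exact absurd hpa h2
          · exact Or.inr ⟨h1, h2⟩
    · -- append a
      simp only [List.foldl_cons, if_neg hpa]
      have haccA : (acc ++ [a]).Pairwise (· < ·) := by
        rw [List.pairwise_append]
        refine ⟨hacc, List.pairwise_singleton _ _, ?_⟩
        intro y hy z hz
        rcases List.mem_singleton.mp hz with rfl
        rcases hlt y hy z (List.mem_cons_self) with h | h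
        · exact absurd h hpa
        · exact h
      have hltA : ∀ y ∈ acc ++ [a], ∀ z ∈ t, some a = some z ∨ y < z := by
        intro y hy z hz
        rcases List.mem_append.mp hy with hy | hy
        · rcases hlt y hy z (List.mem_cons_of_mem _ hz) with h | h
          · -- prev = some z: then z ≤ a (hprev) and a ≤ z (sorted) ⇒ a = z
            obtain ⟨p, hp⟩ : ∃ p, prev = some p := ⟨z, h⟩
            have hz1 : p = z := by rw [hp] at h; exact Option.some.inj h
            have hpz : p ≤ a := hprev p hp a (List.mem_cons_self)
            have haz : a ≤ z := hta z hz
            left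
            congr 1
            subst hz1
            exact le_antisymm haz hpz
          · exact Or.inr h
        · rcases List.mem_singleton.mp hy with rfl
          rcases lt_or_eq_of_le (hta z hz) with h | h
          · exact Or.inr h
          · exact Or.inl (by rw [h])
      obtain ⟨hmem, hsorted⟩ := ih (acc ++ [a]) (some a) hl.of_cons
        (fun p hp y hy => by
          rcases Option.some.inj hp with rfl
          exact hta y hy) haccA hltA
      refine ⟨fun x => ?_, hsorted⟩
      rw [hmem x]
      simp only [List.mem_append, List.mem_cons, List.not_mem_nil, or_false]
      constructor
      · rintro ((h | rfl) | ⟨h1, h2⟩)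
        · exact Or.inl h
        · exact Or.inr ⟨Or.inl rfl, hpa⟩
        · refine Or.inr ⟨Or.inr h1, ?_⟩
          intro hps
          obtain ⟨p, hp⟩ : ∃ p, prev = some p := ⟨x, hps⟩
          have hpx : p = x := by rw [hp] at hps; exact Option.some.inj hps
          have h1' : p ≤ a := hprev p hp a (List.mem_cons_self)
          have h2' : a ≤ x := hta x h1
          have : a = x := le_antisymm h2' (hpx ▸ h1')
          exact h2 (congrArg some this)
      · rintro (h | ⟨(rfl | h1), h2⟩)
        · exact Or.inl (Or.inl h)
        · exact Or.inl (Or.inr rfl)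
        · by_cases hxa : x = a
          · exact Or.inl (Or.inr hxa)
          · exact Or.inr ⟨h1, fun h => hxa (Option.some.inj h).symm⟩

-- ===== VERDICT (by name: the statement is the Claim_ definition above) =====
theorem fetch_annotations_duplicates_spec : Claim_equal_fetch_annotations_duplicates := by
  intro annotations _
  unfold Spec_fetch_annotations_duplicates fetch_annotations_duplicates fetch_annotations_duplicates_alt
  simp only []
  rw [candB_eq]
  simp only [List.nil_append]
  set S : PySem.Set String :=
    annotations.foldl
      (fun acc p =>
        ((PySem.Dict.counter p.2).items).foldl
          (fun acc2 kv => if kv.2 > 1 then PySem.Set.add acc2 kv.1 else acc2) acc)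
      PySem.Set.empty with hS
  set cand := annotations.flatMap (fun p => pvZipDups (PySem.List.sorted p.2 (fun x => x) false)) with hcand
  obtain ⟨hmem, hsorted⟩ := dedupFold_char (PySem.List.sorted cand (fun x => x) false) [] none
    (PySem.List.sorted_pairwise cand (fun x => x))
    (fun p hp => by cases hp) (List.Pairwise.nil)
    (fun y hy => by cases hy)
  set B := ((PySem.List.sorted cand (fun x => x) false).foldl
      (fun (op : List String × Option String) x =>
        if op.2 = some x then op else (op.1 ++ [x], some x)) ([], none)).1 with hB
  have hmemB : ∀ x, x ∈ B ↔ ∃ p ∈ annotations, 2 ≤ p.2.count x := by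
    intro x
    rw [hmem x]
    simp only [List.not_mem_nil, false_or, ne_eq, reduceCtorEq, not_false_eq_true, and_true]
    rw [PySem.List.mem_sorted]
    exact mem_candB annotations x
  have hmemS : ∀ x, x ∈ S ↔ ∃ p ∈ annotations, 2 ≤ p.2.count x := by
    intro x
    rw [hS]
    rw [memA_outer]
    simp [PySem.Set.empty]
  have hnodupS : S.Nodup := nodupA_outer annotations _ List.nodup_nil
  have hnodupB : B.Nodup := hsorted.imp (fun h => ne_of_lt h)
  have hperm : B.Perm S :=
    (List.perm_ext_iff_of_nodup hnodupB hnodupS).mpr (fun x => (hmemB x).trans (hmemS x).symm)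
  exact PySem.List.sorted_eq_of_perm_of_pairwise_lt S B (fun x => x) hperm hsorted
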